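-- pv_equiv track=rewrite | github.com/Smith-Danielle/PythonPractice1 | main.py | block_print
-- ===== SOURCE A (Python) =====
-- def block_print(string):
--     alpha = {' ': ['     ', '     ', '     ', '     ', '     ', '     ', '     '], 'a': [' AAA ', 'A   A', 'A   A', 'AAAAA', 'A   A', 'A   A', 'A   A'], 'b': ['BBBB ', 'B   B', 'B   B', 'BBBB ', 'B   B', 'B   B', 'BBBB '], 'c': [' CCC ', 'C   C', 'C    ', 'C    ', 'C    ', 'C   C', ' CCC '], 'd': ['DDDD ', 'D   D', 'D   D', 'D   D', 'D   D', 'D   D', 'DDDD '], 'e': ['EEEEE', 'E    ', 'E    ', 'EEEEE', 'E    ', 'E    ', 'EEEEE'], 'f': ['FFFFF', 'F    ', 'F    ', 'FFFFF', 'F    ', 'F    ', 'F    '], 'g': [' GGG ', 'G   G', 'G    ', 'G GGG', 'G   G', 'G   G', ' GGG '], 'h': ['H   H', 'H   H', 'H   H', 'HHHHH', 'H   H', 'H   H', 'H   H'], 'i': ['IIIII', '  I  ', '  I  ', '  I  ', '  I  ', '  I  ', 'IIIII'], 'j': ['JJJJJ', '    J', '    J', '    J', '    J', '    J', 'JJJJ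 '], 'k': ['K   K', 'K  K ', 'K K  ', 'KK   ', 'K K  ', 'K  K ', 'K   K'], 'l': ['L    ', 'L    ', 'L    ', 'L    ', 'L    ', 'L    ', 'LLLLL'], 'm': ['M   M', 'MM MM', 'M M M', 'M   M', 'M   M', 'M   M', 'M   M'], 'n': ['N   N', 'NN  N', 'N   N', 'N N N', 'N   N', 'N  NN', 'N   N'], 'o': [' OOO ', 'O   O', 'O   O', 'O   O', 'O   O', 'O   O', ' OOO '], 'p': ['PPPP ', 'P   P', 'P   P', 'PPPP ', 'P    ', 'P    ', 'P    '], 'q': [' QQQ ', 'Q   Q', 'Q   Q', 'Q   Q', 'Q Q Q', 'Q  QQ', ' QQQQ'], 'r': ['RRRR ', 'R   R', 'R   R', 'RRRR ', 'R R  ', 'R  R ', 'R   R'], 's': [' SSS ', 'S   S', 'S    ', ' SSS ', '    S', 'S   S', ' SSS '], 't': ['TTTTT', '  T  ', '  T  ', '  T  ', '  T  ', '  T  ', '  T  '], 'u': ['U   U', 'U   U', 'U   U', 'U   U', 'U   U', 'U   U', ' UUU '], 'v': ['V   V', 'V   V', 'V   V', 'V   V', 'V   V', ' V V ', '  V  '],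 'w': ['W   W', 'W   W', 'W   W', 'W W W', 'W W W', 'W W W', ' W W '], 'x': ['X   X', 'X   X', ' X X ', '  X  ', ' X X ', 'X   X', 'X   X'], 'y': ['Y   Y', 'Y   Y', ' Y Y ', '  Y  ', '  Y  ', '  Y  ', '  Y  '], 'z': ['ZZZZZ', '    Z', '   Z ', '  Z  ', ' Z   ', 'Z    ', 'ZZZZZ']}
--     blocked = ""
--     string = string.strip()
--     if len(string) == 0:
--         return ''
--     for x in range(7):
--         for y in string:
--             blocked += alpha[y.lower()][x] + ' '
--         while blocked[len(blocked) - 1] == " ":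
--             blocked = blocked[:-1]
--         blocked += "\n"
--     return blocked[:-1]
-- ===== SOURCE B (Python) =====
-- # Bitmap font: each glyph is 7 five-bit masks (bit 4 = leftmost column); the banner
-- # is built in ONE pass over the characters, growing all 7 rows simultaneously.
-- FONT = {' ': (' ', [0, 0, 0, 0, 0, 0, 0]), 'a': ('A', [14, 17, 17, 31, 17, 17, 17]), 'b': ('B', [30, 17, 17, 30, 17, 17, 30]), 'c': ('C', [14, 17, 16, 16, 16, 17, 14]), 'd': ('D', [30, 17, 17, 17, 17, 17, 30]), 'e': ('E', [31, 16, 16, 31, 16, 16, 31]), 'f': ('F', [31, 16, 16, 31, 16, 16, 16]), 'g': ('G', [14, 17, 16, 23, 17, 17, 14]), 'h': ('H', [17, 17, 17, 31, 17, 17, 17]), 'i': ('I', [31, 4, 4, 4, 4, 4, 31]), 'j': ('J', [31, 1, 1, 1, 1, 1, 30]), 'k': ('K', [17, 18, 20, 24, 20, 18, 17]), 'l': ('L', [16, 16, 16, 16, 16, 16, 31]), 'm': ('M', [17, 27, 21, 17, 17, 17, 17]), 'n': ('N', [17, 25, 17, 21, 17, 19, 17]), 'o': ('O', [14, 17, 17,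 17, 17, 17, 14]), 'p': ('P', [30, 17, 17, 30, 16, 16, 16]), 'q': ('Q', [14, 17, 17, 17, 21, 19, 15]), 'r': ('R', [30, 17, 17, 30, 20, 18, 17]), 's': ('S', [14, 17, 16, 14, 1, 17, 14]), 't': ('T', [31, 4, 4, 4, 4, 4, 4]), 'u': ('U', [17, 17, 17, 17, 17, 17, 14]), 'v': ('V', [17, 17, 17, 17, 17, 10, 4]), 'w': ('W', [17, 17, 17, 21, 21, 21, 10]), 'x': ('X', [17, 17, 10, 4, 10, 17, 17]), 'y': ('Y', [17, 17, 10, 4, 4, 4, 4]), 'z': ('Z', [31, 1, 2, 4, 8, 16, 31])}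
--
--
-- def block_print(string):
--     string = string.strip()
--     if len(string) == 0:
--         return ''
--     rows = [[] for _ in range(7)]
--     for ch in string:
--         letter, masks = FONT[ch.lower()]
--         for r, m in zip(rows, masks):
--             r.append(''.join(letter if (m >> (4 - b)) & 1 else ' ' for b in range(5)) + ' ')
--     return '\n'.join(''.join(r).rstrip(' ') for r in rows)
-- ===== Notes on version B (the rewrite author's own statement) =====
-- stated objective: alternative
-- what changed: A stores glyphs as a dict of 5-char row strings and builds the banner row-major with 7 passes over the string, quadratic concatenation and a char-by-char trailing-space while loop; B stores the font as 5-bit bitmasks per glyph row, makes a single pass over the characters growing all 7 row accumulators at once by expanding the bits, and finally rstrips and newline-joins the rows.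
-- outside the precondition, e.g. on block_print('a.b'): A raises KeyError, B raises KeyError; on block_print('h1'): A raises KeyError, B raises KeyError
import Mathlib
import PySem

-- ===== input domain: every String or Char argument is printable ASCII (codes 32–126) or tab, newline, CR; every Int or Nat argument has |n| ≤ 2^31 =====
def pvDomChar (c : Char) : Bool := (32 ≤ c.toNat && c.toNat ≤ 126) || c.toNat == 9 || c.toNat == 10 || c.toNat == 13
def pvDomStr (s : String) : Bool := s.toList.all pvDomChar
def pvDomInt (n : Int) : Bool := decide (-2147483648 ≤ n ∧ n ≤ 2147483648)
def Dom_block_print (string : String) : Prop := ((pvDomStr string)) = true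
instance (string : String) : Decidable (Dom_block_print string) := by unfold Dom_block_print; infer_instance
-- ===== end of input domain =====

-- B stores the font as 5-bit bitmasks and builds the banner in one character-major pass that
-- grows all 7 row accumulators at once, instead of A's row-major 7 passes over the string
-- with a trailing-space while loop; objective: alternative.

-- ===== PORT A =====
-- the dict literal 'alpha' of A, as a lookup function (rows stored as List Char)
def glyphRows : Char → Option (List (List Char))
  | ' ' => some ["     ".toList, "     ".toList, "     ".toList, "     ".toList, "     ".toList, "     ".toList, "     ".toList]
  | 'a' => some [" AAA ".toList, "A   A".toList, "A   A".toList, "AAAAA".toList, "A   A".toList, "A   A".toList, "A   A".toList]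
  | 'b' => some ["BBBB ".toList, "B   B".toList, "B   B".toList, "BBBB ".toList, "B   B".toList, "B   B".toList, "BBBB ".toList]
  | 'c' => some [" CCC ".toList, "C   C".toList, "C    ".toList, "C    ".toList, "C    ".toList, "C   C".toList, " CCC ".toList]
  | 'd' => some ["DDDD ".toList, "D   D".toList, "D   D".toList, "D   D".toList, "D   D".toList, "D   D".toList, "DDDD ".toList]
  | 'e' => some ["EEEEE".toList, "E    ".toList, "E    ".toList, "EEEEE".toList, "E    ".toList, "E    ".toList, "EEEEE".toList]
  | 'f' => some ["FFFFF".toList, "F    ".toList, "F    ".toList, "FFFFF".toList, "F    ".toList, "F    ".toList, "F    ".toList]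
  | 'g' => some [" GGG ".toList, "G   G".toList, "G    ".toList, "G GGG".toList, "G   G".toList, "G   G".toList, " GGG ".toList]
  | 'h' => some ["H   H".toList, "H   H".toList, "H   H".toList, "HHHHH".toList, "H   H".toList, "H   H".toList, "H   H".toList]
  | 'i' => some ["IIIII".toList, "  I  ".toList, "  I  ".toList, "  I  ".toList, "  I  ".toList, "  I  ".toList, "IIIII".toList]
  | 'j' => some ["JJJJJ".toList, "    J".toList, "    J".toList, "    J".toList, "    J".toList, "    J".toList, "JJJJ ".toList]
  | 'k' => some ["K   K".toList, "K  K ".toList, "K K  ".toList, "KK   ".toList, "K K  ".toList, "K  K ".toList, "K   K".toList]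
  | 'l' => some ["L    ".toList, "L    ".toList, "L    ".toList, "L    ".toList, "L    ".toList, "L    ".toList, "LLLLL".toList]
  | 'm' => some ["M   M".toList, "MM MM".toList, "M M M".toList, "M   M".toList, "M   M".toList, "M   M".toList, "M   M".toList]
  | 'n' => some ["N   N".toList, "NN  N".toList, "N   N".toList, "N N N".toList, "N   N".toList, "N  NN".toList, "N   N".toList]
  | 'o' => some [" OOO ".toList, "O   O".toList, "O   O".toList, "O   O".toList, "O   O".toList, "O   O".toList, " OOO ".toList]
  | 'p' => some ["PPPP ".toList, "P   P".toList, "P   P".toList, "PPPP ".toList, "P    ".toList, "P    ".toList, "P    ".toList]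
  | 'q' => some [" QQQ ".toList, "Q   Q".toList, "Q   Q".toList, "Q   Q".toList, "Q Q Q".toList, "Q  QQ".toList, " QQQQ".toList]
  | 'r' => some ["RRRR ".toList, "R   R".toList, "R   R".toList, "RRRR ".toList, "R R  ".toList, "R  R ".toList, "R   R".toList]
  | 's' => some [" SSS ".toList, "S   S".toList, "S    ".toList, " SSS ".toList, "    S".toList, "S   S".toList, " SSS ".toList]
  | 't' => some ["TTTTT".toList, "  T  ".toList, "  T  ".toList, "  T  ".toList, "  T  ".toList, "  T  ".toList, "  T  ".toList]
  | 'u' => some ["U   U".toList, "U   U".toList, "U   U".toList, "U   U".toList, "U   U".toList, "U   U".toList, " UUU ".toList]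
  | 'v' => some ["V   V".toList, "V   V".toList, "V   V".toList, "V   V".toList, "V   V".toList, " V V ".toList, "  V  ".toList]
  | 'w' => some ["W   W".toList, "W   W".toList, "W   W".toList, "W W W".toList, "W W W".toList, "W W W".toList, " W W ".toList]
  | 'x' => some ["X   X".toList, "X   X".toList, " X X ".toList, "  X  ".toList, " X X ".toList, "X   X".toList, "X   X".toList]
  | 'y' => some ["Y   Y".toList, "Y   Y".toList, " Y Y ".toList, "  Y  ".toList, "  Y  ".toList, "  Y  ".toList, "  Y  ".toList]
  | 'z' => some ["ZZZZZ".toList, "    Z".toList, "   Z ".toList, "  Z  ".toList, " Z   ".toList, "Z    ".toList, "ZZZZZ".toList]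
  | _ => none

-- A's 'while blocked[len(blocked)-1] == " ": blocked = blocked[:-1]'.
-- blocked[len-1] on empty raises IndexError (excluded by Pre_); getLast? = none is that case.
def pyWhileStrip (b : List Char) : List Char :=
  if _h : b.getLast? = some ' ' then pyWhileStrip b.dropLast else b
termination_by b.length
decreasing_by
  cases b with
  | nil => simp at _h
  | cons a t => simp

def block_print (string : String) : String :=
  let stripped := PySem.Str.strip string
  if PySem.Str.len stripped = 0 then "" else
    let cs := stripped.toList
    let blocked := (PySem.List.pyRange 0 7 1).foldl
      (fun (b : List Char) x =>
        let b := cs.foldl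
          -- alpha[y.lower()][x]; glyphRows = none is Python's KeyError, excluded by Pre_
          (fun b y => b ++ (PySem.List.pyGetD ((glyphRows (PySem.Chars.lowerChar y)).getD []) x [] ++ [' '])) b
        pyWhileStrip b ++ ['\n']) []
    String.ofList blocked.dropLast  -- blocked[:-1]

-- ===== PORT B =====
-- B's FONT dict: the uppercase letter to print and 7 five-bit masks (bit 4 = leftmost column)
def fontB : Char → Option (Char × List Nat)
  | ' ' => some (' ', [0, 0, 0, 0, 0, 0, 0])
  | 'a' => some ('A', [14, 17, 17, 31, 17, 17, 17])
  | 'b' => some ('B', [30, 17, 17, 30, 17, 17, 30])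
  | 'c' => some ('C', [14, 17, 16, 16, 16, 17, 14])
  | 'd' => some ('D', [30, 17, 17, 17, 17, 17, 30])
  | 'e' => some ('E', [31, 16, 16, 31, 16, 16, 31])
  | 'f' => some ('F', [31, 16, 16, 31, 16, 16, 16])
  | 'g' => some ('G', [14, 17, 16, 23, 17, 17, 14])
  | 'h' => some ('H', [17, 17, 17, 31, 17, 17, 17])
  | 'i' => some ('I', [31, 4, 4, 4, 4, 4, 31])
  | 'j' => some ('J', [31, 1, 1, 1, 1, 1, 30])
  | 'k' => some ('K', [17, 18, 20, 24, 20, 18, 17])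
  | 'l' => some ('L', [16, 16, 16, 16, 16, 16, 31])
  | 'm' => some ('M', [17, 27, 21, 17, 17, 17, 17])
  | 'n' => some ('N', [17, 25, 17, 21, 17, 19, 17])
  | 'o' => some ('O', [14, 17, 17, 17, 17, 17, 14])
  | 'p' => some ('P', [30, 17, 17, 30, 16, 16, 16])
  | 'q' => some ('Q', [14, 17, 17, 17, 21, 19, 15])
  | 'r' => some ('R', [30, 17, 17, 30, 20, 18, 17])
  | 's' => some ('S', [14, 17, 16, 14, 1, 17, 14])
  | 't' => some ('T', [31, 4, 4, 4, 4, 4, 4])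
  | 'u' => some ('U', [17, 17, 17, 17, 17, 17, 14])
  | 'v' => some ('V', [17, 17, 17, 17, 17, 10, 4])
  | 'w' => some ('W', [17, 17, 17, 21, 21, 21, 10])
  | 'x' => some ('X', [17, 17, 10, 4, 10, 17, 17])
  | 'y' => some ('Y', [17, 17, 10, 4, 4, 4, 4])
  | 'z' => some ('Z', [31, 1, 2, 4, 8, 16, 31])
  | _ => none

-- ''.join(letter if (m >> (4 - b)) & 1 else ' ' for b in range(5))
def expandRow (letter : Char) (m : Nat) : List Char :=
  (List.range 5).map (fun b => if (m >>> (4 - b)) &&& 1 = 1 then letter else ' ')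

-- r.rstrip(' '): strip only trailing literal spaces
def rstripSp (b : List Char) : List Char := (b.reverse.dropWhile (fun ch => ch == ' ')).reverse

def block_print_alt (string : String) : String :=
  let stripped := PySem.Str.strip string
  if PySem.Str.len stripped = 0 then "" else
    let rows := stripped.toList.foldl
      (fun rows ch =>
        -- FONT[ch.lower()]; fontB = none is Python's KeyError, excluded by Pre_
        let lm := (fontB (PySem.Chars.lowerChar ch)).getD (' ', [])
        List.zipWith (fun r m => r ++ [expandRow lm.1 m ++ [' ']]) rows lm.2)
      (List.replicate 7 [])
    String.ofList (PySem.Chars.join ['\n'] (rows.map (fun r => rstripSp r.flatten)))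

-- ===== PRECONDITION & SPEC =====
def okChars : List Char := " abcdefghijklmnopqrstuvwxyzABCDEFGHIJKLMNOPQRSTUVWXYZ".toList
-- Pre_ excludes exactly the inputs on which A raises KeyError: a character (after strip)
-- that is not an ASCII letter or space; B raises KeyError there too.
def Pre_block_print (string : String) : Prop :=
  ((PySem.Str.strip string).toList.all (fun c => okChars.contains c)) = true
instance (string : String) : Decidable (Pre_block_print string) := by
  unfold Pre_block_print; infer_instance
def pvWitness_block_print : String := "Hello World"
def Spec_block_print (string : String) (out : String) : Prop := out = block_print_alt string
instance (string : String) (out : String) : Decidable (Spec_block_print string out) := by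
  unfold Spec_block_print; infer_instance

-- ===== CLAIM (what is proved, stated in full; the proofs are below) =====
def Claim_equal_block_print : Prop := ∀ (string : String), Dom_block_print string → Pre_block_print string → Spec_block_print string (block_print string)

-- ===== LEMMAS AND PROOFS =====

def G (c : Char) : List (List Char) := (glyphRows (PySem.Chars.lowerChar c)).getD []

def gRow (i : Nat) (c : Char) : List Char := (G c).getD i []

def F (c : Char) : Char × List Nat := (fontB (PySem.Chars.lowerChar c)).getD (' ', [])

def tableCheck (c : Char) : Bool :=
  ((G c).length == 7) && ((F c).2.length == 7) &&
  (List.range 7).all (fun i => expandRow (F c).1 ((F c).2.getD i 0) == gRow i c) &&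
  ((c == ' ') || (G c).all (fun r => r.any (fun ch => !(ch == ' '))))

set_option maxRecDepth 40000 in
lemma table_all : okChars.all tableCheck = true := by decide

lemma table_props (c : Char) (h : c ∈ okChars) :
    (G c).length = 7 ∧ (F c).2.length = 7 ∧
    (∀ i < 7, expandRow (F c).1 ((F c).2.getD i 0) = gRow i c) ∧
    (c ≠ ' ' → ∀ r ∈ G c, ∃ ch ∈ r, (ch == ' ') = false) := by
  have ht := List.all_eq_true.1 table_all c h
  simp only [tableCheck, Bool.and_eq_true, Bool.or_eq_true, beq_iff_eq, List.all_eq_true,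
    List.any_eq_true, Bool.not_eq_true', List.mem_range] at ht
  obtain ⟨⟨⟨h1, h2⟩, h3⟩, h4⟩ := ht
  refine ⟨h1, h2, h3, fun hne => ?_⟩
  rcases h4 with h4 | h4
  · exact absurd h4 hne
  · exact h4

lemma table_len (c : Char) (h : c ∈ okChars) : (G c).length = 7 := (table_props c h).1

lemma masks_len (c : Char) (h : c ∈ okChars) : (F c).2.length = 7 := (table_props c h).2.1

lemma expand_eq (c : Char) (h : c ∈ okChars) :
    ∀ i < 7, expandRow (F c).1 ((F c).2.getD i 0) = gRow i c := (table_props c h).2.2.1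

lemma table_nonspace (c : Char) (h : c ∈ okChars) :
    c ≠ ' ' → ∀ r ∈ G c, ∃ ch ∈ r, (ch == ' ') = false := (table_props c h).2.2.2

lemma head_dropWhile_false (p : Char → Bool) : ∀ (l : List Char) (c : Char) (t : List Char),
    l.dropWhile p = c :: t → p c = false := by
  intro l
  induction l with
  | nil => intro c t h; simp at h
  | cons a l ih =>
    intro c t h
    rw [List.dropWhile_cons] at h
    by_cases hp : p a = true
    · rw [if_pos hp] at h; exact ih c t h
    · rw [if_neg hp] at h
      injection h with h1 _
      rw [← h1]; simpa using hp

lemma strip_head_not_space (s : List Char) (c : Char) (t : List Char)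
    (h : PySem.Chars.strip s = c :: t) : PySem.Chars.isspace c = false := by
  unfold PySem.Chars.strip PySem.Chars.rstrip PySem.Chars.lstrip at h
  obtain ⟨u, hu⟩ := List.dropWhile_suffix (l := (s.dropWhile PySem.Chars.isspace).reverse)
    PySem.Chars.isspace
  have hl : s.dropWhile PySem.Chars.isspace = (c :: t) ++ u.reverse := by
    conv_lhs => rw [← List.reverse_reverse (s.dropWhile PySem.Chars.isspace), ← hu]
    rw [List.reverse_append, h]
  exact head_dropWhile_false PySem.Chars.isspace s c (t ++ u.reverse) (by rw [hl]; simp)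

lemma pyWhileStrip_eq (b : List Char) : pyWhileStrip b = rstripSp b := by
  unfold rstripSp
  induction b using List.reverseRecOn with
  | nil => simp [pyWhileStrip]
  | append_singleton l a ih =>
    rw [pyWhileStrip]
    by_cases ha : a = ' '
    · subst ha
      rw [dif_pos (by simp)]
      rw [List.dropLast_concat, ih]
      simp
    · rw [dif_neg (by simp [ha])]
      have : (a == ' ') = false := by simp [ha]
      simp [List.reverse_append, this]

lemma pyWhileStrip_append (u v : List Char) (hv : ∃ x ∈ v, (x == ' ') = false) :
    pyWhileStrip (u ++ v) = u ++ pyWhileStrip v := by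
  rw [pyWhileStrip_eq, pyWhileStrip_eq]
  unfold rstripSp
  rw [List.reverse_append, List.dropWhile_append]
  have hne : v.reverse.dropWhile (fun ch => ch == ' ') ≠ [] := by
    rw [Ne, List.dropWhile_eq_nil_iff]
    intro hall
    obtain ⟨x, hx, hxs⟩ := hv
    have := hall x (List.mem_reverse.2 hx)
    rw [hxs] at this
    cases this
  rw [if_neg (by simpa [List.isEmpty_iff] using hne)]
  simp

lemma rstripSp_concat_space (w : List Char) : rstripSp (w ++ [' ']) = rstripSp w := by
  unfold rstripSp
  simp [List.reverse_append]

lemma join_cons_exists (sep p : List Char) (rest : List (List Char)) :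
    ∃ w, PySem.Chars.join sep (p :: rest) = p ++ w := by
  cases rest with
  | nil => exact ⟨[], by simp [PySem.Chars.join, List.intercalate]⟩
  | cons q r => exact ⟨sep ++ PySem.Chars.join sep (q :: r), by rw [PySem.Chars.join_cons_cons]; simp⟩

lemma flatMap_eq_join (g : Char → List Char) : ∀ (c : Char) (cs : List Char),
    (c :: cs).flatMap (fun y => g y ++ [' ']) =
      PySem.Chars.join [' '] ((c :: cs).map g) ++ [' '] := by
  intro c cs
  induction cs generalizing c with
  | nil => simp [PySem.Chars.join, List.intercalate]
  | cons c' cs ih =>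
    rw [List.flatMap_cons, ih c']
    simp only [List.map_cons]
    rw [PySem.Chars.join_cons_cons]
    simp [List.append_assoc]

lemma flatten_rows_dropLast : ∀ (rs : List (List Char)), rs ≠ [] →
    ((rs.map (fun r => r ++ ['\n'])).flatten).dropLast = PySem.Chars.join ['\n'] rs := by
  intro rs
  induction rs with
  | nil => intro h; exact absurd rfl h
  | cons r rest ih =>
    intro _
    cases rest with
    | nil => simp [PySem.Chars.join, List.intercalate]
    | cons r' rest' =>
      rw [List.map_cons, List.flatten_cons, PySem.Chars.join_cons_cons,
        List.dropLast_append_of_ne_nil (by simp), ih (by simp)]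

-- A-side: the row-major double loop, characterised
lemma blocked_loop (c0 : Char) (cs' : List Char) (hok : ∀ c ∈ c0 :: cs', c ∈ okChars)
    (h0 : c0 ≠ ' ') :
    ∀ (xs : List Int), (∀ x ∈ xs, 0 ≤ x ∧ x < 7) → ∀ (b : List Char),
    xs.foldl (fun b x => pyWhileStrip ((c0 :: cs').foldl
        (fun b y => b ++ (PySem.List.pyGetD (G y) x [] ++ [' '])) b) ++ ['\n']) b
      = b ++ (xs.map (fun x =>
          rstripSp (PySem.Chars.join [' '] ((c0 :: cs').map (gRow x.toNat)))
            ++ ['\n'])).flatten := by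
  intro xs
  induction xs with
  | nil => intro _ b; simp
  | cons x xs ih =>
    intro hxs b
    obtain ⟨hx0, hx7⟩ := hxs x (by simp)
    have hget : ∀ y, PySem.List.pyGetD (G y) x [] = gRow x.toNat y := by
      intro y; rw [PySem.List.pyGetD_of_nonneg _ _ hx0]; rfl
    have hmem0 : gRow x.toNat c0 ∈ G c0 := by
      have hlen := table_len c0 (hok c0 (by simp))
      have hlt : x.toNat < (G c0).length := by omega
      rw [gRow, List.getD_eq_getElem _ _ hlt]
      exact List.getElem_mem hlt
    obtain ⟨ch, hch, hchs⟩ := table_nonspace c0 (hok c0 (by simp)) h0 _ hmem0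
    obtain ⟨w, hw⟩ := join_cons_exists [' '] (gRow x.toNat c0) (cs'.map (gRow x.toNat))
    have hJmap : (c0 :: cs').map (gRow x.toNat) = gRow x.toNat c0 :: cs'.map (gRow x.toNat) := rfl
    set J := PySem.Chars.join [' '] ((c0 :: cs').map (gRow x.toNat)) with hJ
    have step : pyWhileStrip ((c0 :: cs').foldl
        (fun b y => b ++ (PySem.List.pyGetD (G y) x [] ++ [' '])) b)
        = b ++ rstripSp J := by
      have hfold : (c0 :: cs').foldl
          (fun b y => b ++ (PySem.List.pyGetD (G y) x [] ++ [' '])) b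
          = b ++ (c0 :: cs').flatMap (fun y => PySem.List.pyGetD (G y) x [] ++ [' ']) :=
        PySem.List.foldl_append_eq_flatMap _ _ _
      have hfm : (c0 :: cs').flatMap (fun y => PySem.List.pyGetD (G y) x [] ++ [' '])
          = J ++ [' '] := by
        have : (fun y => PySem.List.pyGetD (G y) x [] ++ [' '])
            = (fun y => gRow x.toNat y ++ [' ']) := by
          funext y; rw [hget y]
        rw [this, flatMap_eq_join (gRow x.toNat) c0 cs', hJ]
      rw [hfold, hfm]
      rw [pyWhileStrip_append b (J ++ [' ']) ?_]
      · rw [pyWhileStrip_eq, rstripSp_concat_space]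
      · refine ⟨ch, ?_, hchs⟩
        rw [hJ, hJmap, hw]
        simp [hch]
    rw [List.foldl_cons, step, ih (fun x' hx' => hxs x' (by simp [hx'])) _]
    simp
    rw [hJ, hJmap]

-- B-side helpers
lemma eq_map_range_of_len {α : Type} (d : α) (l : List α) (h : l.length = 7) :
    l = (List.range 7).map (fun i => l.getD i d) := by
  apply List.ext_getElem
  · simp [h]
  · intro i h1 h2
    simp only [List.getElem_map, List.getElem_range]
    rw [List.getD_eq_getElem]

lemma zipWith_map_map {α β γ δ : Type} (f : β → γ → δ) (g : α → β) (h : α → γ) (l : List α) :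
    List.zipWith f (l.map g) (l.map h) = l.map (fun i => f (g i) (h i)) := by
  induction l with
  | nil => rfl
  | cons a t ih => simp [ih]

lemma flatten_map_eq_flatMap {α β : Type} (f : α → List β) (l : List α) :
    (l.map f).flatten = l.flatMap f := by
  induction l with
  | nil => rfl
  | cons a t ih => simp [ih]

-- B-side: the character-major fold, characterised
lemma b_fold (cs : List Char) (hok : ∀ c ∈ cs, c ∈ okChars) : ∀ (g : Nat → List (List Char)),
    cs.foldl (fun rows ch =>
        let lm := (fontB (PySem.Chars.lowerChar ch)).getD (' ', [])
        List.zipWith (fun r m => r ++ [expandRow lm.1 m ++ [' ']]) rows lm.2)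
      ((List.range 7).map g)
    = (List.range 7).map (fun i => g i ++ cs.map (fun c => gRow i c ++ [' '])) := by
  induction cs with
  | nil => intro g; simp
  | cons c cs ih =>
    intro g
    rw [List.foldl_cons]
    have hm := masks_len c (hok c (by simp))
    have step : (let lm := (fontB (PySem.Chars.lowerChar c)).getD (' ', []);
        List.zipWith (fun r m => r ++ [expandRow lm.1 m ++ [' ']]) ((List.range 7).map g) lm.2)
        = (List.range 7).map (fun i => g i ++ [gRow i c ++ [' ']]) := by
      show List.zipWith (fun r m => r ++ [expandRow (F c).1 m ++ [' ']])
          ((List.range 7).map g) (F c).2 = _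
      conv_lhs => rw [eq_map_range_of_len 0 (F c).2 hm]
      rw [zipWith_map_map]
      refine List.map_congr_left ?_
      intro i hi
      rw [expand_eq c (hok c (by simp)) i (List.mem_range.1 hi)]
    rw [step, ih (fun c' hc' => hok c' (by simp [hc'])) (fun i => g i ++ [gRow i c ++ [' ']])]
    refine List.map_congr_left ?_
    intro i _
    simp [List.append_assoc]

-- ===== VERDICT (by name: the statement is the Claim_ definition above) =====
set_option maxHeartbeats 2000000 in
theorem block_print_spec : Claim_equal_block_print := by
  intro s _ hpre
  unfold Spec_block_print block_print block_print_alt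
  dsimp only
  rcases hcs : (PySem.Str.strip s).toList with _ | ⟨c0, cs'⟩
  · rw [show PySem.Str.len (PySem.Str.strip s) = 0 by simp [PySem.Str.len, hcs]]
    simp
  · have hlen : PySem.Str.len (PySem.Str.strip s) ≠ 0 := by
      simp [PySem.Str.len, hcs]
      omega
    rw [if_neg hlen, if_neg hlen]
    have hok : ∀ c ∈ c0 :: cs', c ∈ okChars := by
      rw [← hcs]
      intro c hc
      have := (List.all_eq_true.1 hpre) c hc
      simpa using this
    have h0 : c0 ≠ ' ' := by
      have hsp : PySem.Chars.isspace c0 = false := by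
        apply strip_head_not_space s.toList c0 cs'
        rw [← PySem.Str.toList_strip, hcs]
      intro h; rw [h] at hsp; cases hsp
    have hrange : PySem.List.pyRange 0 7 1 = [0, 1, 2, 3, 4, 5, 6] := by decide
    have hA := blocked_loop c0 cs' hok h0 [0, 1, 2, 3, 4, 5, 6] (by decide) []
    have hrep : (List.replicate 7 ([] : List (List Char)))
        = (List.range 7).map (fun _ => ([] : List (List Char))) := rfl
    have hB := b_fold (c0 :: cs') hok (fun _ => [])
    have key : (List.foldl
          (fun b x => pyWhileStrip (List.foldl
            (fun b y => b ++ (PySem.List.pyGetD (G y) x [] ++ [' '])) b (c0 :: cs')) ++ ['\n'])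
          [] (PySem.List.pyRange 0 7 1)).dropLast
        = PySem.Chars.join ['\n']
            ((List.foldl (fun rows ch =>
                let lm := (fontB (PySem.Chars.lowerChar ch)).getD (' ', []);
                List.zipWith (fun r m => r ++ [expandRow lm.1 m ++ [' ']]) rows lm.2)
              (List.replicate 7 []) (c0 :: cs')).map (fun r => rstripSp r.flatten)) := by
      rw [hrange, hA, hrep, hB]
      rw [← flatten_rows_dropLast _ (by simp)]
      congr 1
      rw [show List.range 7 = [0, 1, 2, 3, 4, 5, 6] by decide]
      simp only [List.map_cons, List.map_nil, List.nil_append]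
      norm_num
      have hrow : ∀ i : Nat,
          rstripSp (gRow i c0 ++ ' ' :: cs'.flatMap (fun c => gRow i c ++ [' '])) =
          rstripSp (PySem.Chars.join [' '] (gRow i c0 :: cs'.map (gRow i))) := by
        intro i
        have h := flatMap_eq_join (gRow i) c0 cs'
        rw [List.flatMap_cons] at h
        rw [show gRow i c0 ++ ' ' :: cs'.flatMap (fun c => gRow i c ++ [' '])
              = PySem.Chars.join [' '] ((c0 :: cs').map (gRow i)) ++ [' '] by
            rw [← h]; simp [List.append_assoc], rstripSp_concat_space]
        rfl
      simp only [show Int.toNat 2 = 2 from rfl, show Int.toNat 3 = 3 from rfl,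
        show Int.toNat 4 = 4 from rfl, show Int.toNat 5 = 5 from rfl,
        show Int.toNat 6 = 6 from rfl]
      simp only [flatten_map_eq_flatMap]
      rw [hrow 0, hrow 1, hrow 2, hrow 3, hrow 4, hrow 5, hrow 6]
    exact congrArg String.ofList key
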